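-- pv_equiv track=rewrite | github.com/GowthamSagar310/Competitive-Programming-Problems | 320A.py | solve
-- ===== SOURCE A (Python) =====
-- def solve(s):
--     if s[0] == "4":
--         return "NO"
--     count = 0
--     for l in s:
--         if l != "1" and l != "4":
--             return "NO"
--         if l == "4":
--             count += 1
--             if count > 2:
--                 return "NO"
--         else:
--             count = 0
--     return "YES"
-- ===== SOURCE B (Python) =====
-- def solve(s):
--     if s[0] != "1":
--         return "NO"
--     if all(c == "1" or c == "4" for c in s) and "444" not in s:
--         return "YES"
--     return "NO"
-- ===== Notes on version B (the rewrite author's own statement) =====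
-- stated objective: idiomatic
-- what changed: Replaces the per-character consecutive-4 counter loop by a first-digit guard plus whole-string checks: all characters in {1,4} and no '444' substring.
import Mathlib
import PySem

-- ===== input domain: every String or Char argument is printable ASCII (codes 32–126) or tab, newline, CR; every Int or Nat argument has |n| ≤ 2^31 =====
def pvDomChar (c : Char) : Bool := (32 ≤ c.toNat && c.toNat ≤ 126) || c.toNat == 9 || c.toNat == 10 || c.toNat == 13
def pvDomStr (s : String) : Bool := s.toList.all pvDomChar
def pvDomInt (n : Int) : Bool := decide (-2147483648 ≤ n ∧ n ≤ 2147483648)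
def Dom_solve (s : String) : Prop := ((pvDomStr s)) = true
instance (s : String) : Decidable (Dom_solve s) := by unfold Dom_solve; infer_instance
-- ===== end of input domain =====

-- B replaces A's per-character consecutive-4 counter by a first-digit guard plus
-- whole-string checks (all chars in {1,4}, no "444" substring); objective: idiomatic.


-- ===== PORT A =====
-- the for-loop with early returns, state = count of consecutive '4's
def solveLoop : List Char → Int → String
  | [], _ => "YES"
  | l :: rest, count =>
    if l ≠ '1' ∧ l ≠ '4' then "NO"
    else if l = '4' then
      if count + 1 > 2 then "NO" else solveLoop rest (count + 1)
    else solveLoop rest 0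

def solve (s : String) : String :=
  match PySem.Str.pyGet? s 0 with
  | none => "NO"              -- Python raises IndexError here (excluded by Pre_solve)
  | some c => if c = '4' then "NO" else solveLoop s.toList 0

-- ===== PORT B =====
def solve_alt (s : String) : String :=
  match PySem.Str.pyGet? s 0 with
  | none => "NO"              -- Python raises IndexError here (excluded by Pre_solve)
  | some c =>
    if c ≠ '1' then "NO"
    else if (s.toList.all fun c => c = '1' || c = '4') && !(PySem.Str.isIn "444" s) then "YES"
    else "NO"

-- ===== PRECONDITION & SPEC =====
-- Pre_ excludes only the empty string, on which both Pythons raise IndexError at s[0].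
def Pre_solve (s : String) : Prop := s ≠ ""
instance (s : String) : Decidable (Pre_solve s) := by unfold Pre_solve; infer_instance
def pvWitness_solve : String := "1441"

def Spec_solve (s : String) (out : String) : Prop := out = solve_alt s
instance (s : String) (out : String) : Decidable (Spec_solve s out) := by unfold Spec_solve; infer_instance

-- ===== CLAIM (what is proved, stated in full; the proofs are below) =====
def Claim_equal_solve : Prop := ∀ (s : String), Dom_solve s → Pre_solve s → Spec_solve s (solve s)

-- ===== LEMMAS AND PROOFS =====

-- the run of '4's that would overflow the counter, given `count` consecutive '4's already seen
def need (k : Int) : List Char := if k = 0 then ['4','4','4'] else if k = 1 then ['4','4'] else ['4']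

lemma loopYES (l : List Char) : ∀ k : Int, (k = 0 ∨ k = 1 ∨ k = 2) →
    (solveLoop l k = "YES" ↔
      (∀ c ∈ l, c = '1' ∨ c = '4') ∧ ¬(['4','4','4'] <:+: l) ∧ ¬(need k <+: l)) := by
  induction l with
  | nil =>
    rintro k (rfl | rfl | rfl) <;> simp [solveLoop, need]
  | cons c rest ih =>
    rintro k hk
    by_cases hc4 : c = '4'
    · subst hc4
      rcases hk with rfl | rfl | rfl
      · rw [show solveLoop ('4' :: rest) 0 = solveLoop rest 1 by simp [solveLoop],
          ih 1 (by simp)]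
        simp only [need, List.infix_cons_iff, if_neg (by decide : (1 : Int) ≠ 0)]
        constructor
        · rintro ⟨hv, hinf, hpre⟩
          refine ⟨by simpa using hv, ?_, ?_⟩
          · rintro (h | h)
            · exact hpre (List.cons_prefix_cons.mp h).2
            · exact hinf h
          · intro h
            exact hpre (List.cons_prefix_cons.mp h).2
        · rintro ⟨hv, hinf, hpre⟩
          refine ⟨fun x hx => hv x (by simp [hx]), fun h => hinf (Or.inr h), fun h => ?_⟩
          exact hpre (List.cons_prefix_cons.mpr ⟨rfl, h⟩)
      · rw [show solveLoop ('4' :: rest) 1 = solveLoop rest 2 by simp [solveLoop],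
          ih 2 (by simp)]
        simp only [need, if_neg (by decide : (1 : Int) ≠ 0),
          if_neg (by decide : (2 : Int) ≠ 0), if_neg (by decide : (2 : Int) ≠ 1),
          List.infix_cons_iff]
        constructor
        · rintro ⟨hv, hinf, hpre⟩
          refine ⟨by simpa using hv, ?_, ?_⟩
          · rintro (h | h)
            · exact hpre ((by decide : ['4'] <+: ['4','4']).trans (List.cons_prefix_cons.mp h).2)
            · exact hinf h
          · intro h
            exact hpre (List.cons_prefix_cons.mp h).2
        · rintro ⟨hv, hinf, hpre⟩
          refine ⟨fun x hx => hv x (by simp [hx]), fun h => hinf (Or.inr h), fun h => ?_⟩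
          exact hpre (List.cons_prefix_cons.mpr ⟨rfl, h⟩)
      · constructor
        · intro h; simp [solveLoop] at h
        · rintro ⟨_, _, hpre⟩
          exact absurd (by simp [need, List.cons_prefix_cons] : need 2 <+: '4' :: rest) hpre
    · by_cases hc1 : c = '1'
      · subst hc1
        rw [show solveLoop ('1' :: rest) k = solveLoop rest 0 by simp [solveLoop],
          ih 0 (by simp)]
        have hm : ∃ m, need k = '4' :: m := by
          rcases hk with rfl | rfl | rfl <;> simp [need]
        rcases hm with ⟨m, hm⟩
        simp only [List.infix_cons_iff, hm]
        constructor
        · rintro ⟨hv, hinf, -⟩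
          refine ⟨by simpa using hv, ?_, fun h => ?_⟩
          · rintro (h | h)
            · exact absurd (List.cons_prefix_cons.mp h).1 (by decide)
            · exact hinf h
          · exact absurd (List.cons_prefix_cons.mp h).1 (by decide)
        · rintro ⟨hv, hinf, -⟩
          refine ⟨fun x hx => hv x (by simp [hx]), fun h => hinf (Or.inr h), fun h => ?_⟩
          have := h.isInfix
          exact hinf (Or.inr this)
      · constructor
        · intro h; simp [solveLoop, hc1, hc4] at h
        · rintro ⟨hv, -, -⟩
          rcases hv c (by simp) with h | h
          · exact absurd h hc1
          · exact absurd h hc4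

lemma loopYN (l : List Char) : ∀ k, solveLoop l k = "YES" ∨ solveLoop l k = "NO" := by
  induction l with
  | nil => intro k; left; rfl
  | cons c rest ih =>
    intro k
    by_cases h1 : c ≠ '1' ∧ c ≠ '4'
    · right; simp [solveLoop, h1]
    · by_cases h4 : c = '4'
      · by_cases hk : k + 1 > 2
        · right; simp [solveLoop, h4, hk]
        · rw [show solveLoop (c :: rest) k = solveLoop rest (k + 1) by
            simp [solveLoop, h4, hk]]
          exact ih (k + 1)
      · have hc1 : c = '1' := by tauto
        rw [show solveLoop (c :: rest) k = solveLoop rest 0 by simp [solveLoop, hc1]]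
        exact ih 0

lemma isIn444_iff (s : String) :
    PySem.Str.isIn "444" s = true ↔ ['4','4','4'] <:+: s.toList := by
  rw [PySem.Str.isIn_iff_infix]
  norm_num [show "444".toList = ['4','4','4'] from by decide]

-- ===== VERDICT (by name: the statement is the Claim_ definition above) =====
theorem solve_spec : Claim_equal_solve := by
  intro s _ hpre
  unfold Spec_solve solve solve_alt
  have hne : s.toList ≠ [] := by simpa using (hpre : s ≠ "")
  obtain ⟨c, rest, hl⟩ : ∃ c rest, s.toList = c :: rest := by
    cases h : s.toList with
    | nil => exact absurd h hne
    | cons c rest => exact ⟨c, rest, rfl⟩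
  have hget : PySem.Str.pyGet? s 0 = some c := by
    rw [show (0 : Int) = ((0 : Nat) : Int) from rfl, PySem.Str.pyGet?_natCast, hl]; rfl
  rw [hget]
  by_cases hc4 : c = '4'
  · simp [hc4]
  · by_cases hc1 : c = '1'
    · simp only [hc1, ite_not]
      have hiff : solveLoop s.toList 0 = "YES" ↔
          (((s.toList.all fun c => c = '1' || c = '4') && !(PySem.Str.isIn "444" s)) = true) := by
        rw [loopYES s.toList 0 (by simp)]
        constructor
        · rintro ⟨hv, hinf, -⟩
          have h1 : (s.toList.all fun c => c = '1' || c = '4') = true := by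
            simpa [List.all_eq_true] using hv
          have h2 : (!(PySem.Str.isIn "444" s)) = true := by
            rw [Bool.not_eq_true']
            cases hI : PySem.Str.isIn "444" s
            · rfl
            · exact absurd ((isIn444_iff s).mp hI) hinf
          rw [Bool.and_eq_true]; exact ⟨h1, h2⟩
        · intro hcond
          rw [Bool.and_eq_true] at hcond
          have h1 := hcond.1
          have h2 := hcond.2
          have hinf : ¬(['4','4','4'] <:+: s.toList) := fun h => by
            rw [(isIn444_iff s).mpr h] at h2; simp at h2
          refine ⟨by simpa [List.all_eq_true] using h1, hinf, fun h => ?_⟩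
          exact hinf (by simpa [need] using h.isInfix)
      by_cases hcond : ((s.toList.all fun c => c = '1' || c = '4') && !(PySem.Str.isIn "444" s)) = true
      · rw [if_pos hcond]; exact hiff.mpr hcond
      · rw [if_neg hcond]
        rcases loopYN s.toList 0 with h | h
        · exact absurd (hiff.mp h) hcond
        · exact h
    · simp only [if_neg hc4, ite_not, if_neg hc1]
      rcases loopYN s.toList 0 with h | h
      · have hv := ((loopYES s.toList 0 (by simp)).mp h).1
        rcases hv c (by rw [hl]; simp) with h1 | h4
        · exact absurd h1 hc1
        · exact absurd h4 hc4
      · exact h
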